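-- pv_equiv track=rewrite | github.com/ds4dh/CT-ADE | g0_create_ct_ade_raw.py | find_partial_match
-- ===== SOURCE A (Python) =====
-- from typing import Optional, Dict, Any, Set, List, Tuple, Iterator, TypeVar, Callable
--
-- def find_partial_match(
--     candidate_synonyms: Set[str], intervention_synonyms: Set[str]
-- ) -> Optional[str]:
--     """
--     Identifies the first partial matching synonym between two sets of synonyms.
--
--     Args:
--         candidate_synonyms (Set[str]): The first set of synonyms.
--         intervention_synonyms (Set[str]): The second set of synonyms.
--
--     Returns:
--         Optional[str]: The first partial matching synonym if found, None otherwise.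
--     """
--     # Convert sets to sorted lists to maintain a consistent order
--     sorted_candidates = sorted(candidate_synonyms)
--     sorted_interventions = sorted(intervention_synonyms)
--     for candidate in sorted_candidates:
--         for intervention in sorted_interventions:
--             if intervention in candidate:
--                 return candidate
--     return None
-- ===== SOURCE B (Python) =====
-- def find_partial_match(candidate_synonyms, intervention_synonyms):
--     matches = [c for c in candidate_synonyms
--                if any(i in c for i in intervention_synonyms)]
--     return min(matches) if matches else None
-- ===== Notes on version B (the rewrite author's own statement) =====
-- stated objective: simpler
-- what changed: B drops both sorts and the nested early-return loops: it filters the candidates that contain any intervention and returns the minimum of that list (the first matching element of the sorted candidates IS the least matching candidate, and the inner order over interventions is irrelevant).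
import Mathlib
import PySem

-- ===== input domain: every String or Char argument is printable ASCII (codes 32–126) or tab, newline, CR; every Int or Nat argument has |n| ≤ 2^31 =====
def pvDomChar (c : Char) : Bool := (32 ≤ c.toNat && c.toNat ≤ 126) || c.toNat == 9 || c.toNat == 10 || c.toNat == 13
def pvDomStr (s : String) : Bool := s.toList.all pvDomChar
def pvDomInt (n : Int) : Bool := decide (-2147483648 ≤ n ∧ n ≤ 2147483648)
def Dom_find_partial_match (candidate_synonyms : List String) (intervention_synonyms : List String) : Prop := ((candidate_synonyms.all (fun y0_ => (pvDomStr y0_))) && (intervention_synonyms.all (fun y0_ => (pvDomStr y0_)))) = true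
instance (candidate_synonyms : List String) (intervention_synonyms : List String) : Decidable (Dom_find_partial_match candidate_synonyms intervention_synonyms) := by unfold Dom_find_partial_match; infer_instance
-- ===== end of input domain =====

-- B replaces A's two sorts and nested early-return loops by a filter + minimum: same value, simpler.


-- ===== PORT A =====
-- inner 'for intervention in sorted_interventions: if intervention in candidate: return candidate'
def fpmInner (candidate : String) : List String → Option String
  | [] => none
  | i :: rest => if PySem.Str.isIn i candidate then some candidate else fpmInner candidate rest

-- outer 'for candidate in sorted_candidates: …'
def fpmOuter (sorted_interventions : List String) : List String → Option String
  | [] => none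
  | c :: rest =>
    match fpmInner c sorted_interventions with
    | some r => some r
    | none => fpmOuter sorted_interventions rest

def find_partial_match (candidate_synonyms : List String) (intervention_synonyms : List String) : Option String :=
  let sorted_candidates := PySem.List.sorted candidate_synonyms (fun x => x) false
  let sorted_interventions := PySem.List.sorted intervention_synonyms (fun x => x) false
  fpmOuter sorted_interventions sorted_candidates

-- ===== PORT B =====
def find_partial_match_alt (candidate_synonyms : List String) (intervention_synonyms : List String) : Option String :=
  let matched := candidate_synonyms.filter (fun c => intervention_synonyms.any (fun i => PySem.Str.isIn i c))
  if matched.isEmpty then none else PySem.List.min? matched (fun x => x)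

-- ===== PRECONDITION & SPEC =====
def Spec_find_partial_match (candidate_synonyms : List String) (intervention_synonyms : List String) (out : Option String) : Prop := out = find_partial_match_alt candidate_synonyms intervention_synonyms
instance (candidate_synonyms : List String) (intervention_synonyms : List String) (out : Option String) : Decidable (Spec_find_partial_match candidate_synonyms intervention_synonyms out) := by unfold Spec_find_partial_match; infer_instance

-- ===== CLAIM (what is proved, stated in full; the proofs are below) =====
def Claim_equal_find_partial_match : Prop := ∀ (candidate_synonyms : List String) (intervention_synonyms : List String), Dom_find_partial_match candidate_synonyms intervention_synonyms → Spec_find_partial_match candidate_synonyms intervention_synonyms (find_partial_match candidate_synonyms intervention_synonyms)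

-- ===== LEMMAS AND PROOFS =====

-- the inner loop returns the candidate iff some intervention is contained in it
theorem fpmInner_eq (c : String) (is_ : List String) :
    fpmInner c is_ = if is_.any (fun i => PySem.Str.isIn i c) then some c else none := by
  induction is_ with
  | nil => rfl
  | cons i rest ih =>
    cases h : PySem.Str.isIn i c with
    | true => simp only [fpmInner, h, List.any_cons, Bool.true_or, if_true]
    | false => simp only [fpmInner, h, List.any_cons, Bool.false_or]; exact ih

-- the outer loop is find? with the "any intervention is a substring" predicate
theorem fpmOuter_eq (is_ : List String) (cs : List String) :
    fpmOuter is_ cs = cs.find? (fun c => is_.any (fun i => PySem.Str.isIn i c)) := by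
  induction cs with
  | nil => rfl
  | cons c rest ih =>
    cases h : is_.any (fun i => PySem.Str.isIn i c) with
    | true =>
      show (match fpmInner c is_ with | some r => some r | none => fpmOuter is_ rest) = _
      rw [fpmInner_eq, h]
      exact (List.find?_cons_of_pos (p := fun c => is_.any fun i => PySem.Str.isIn i c) h).symm
    | false =>
      show (match fpmInner c is_ with | some r => some r | none => fpmOuter is_ rest) = _
      rw [fpmInner_eq, h,
        List.find?_cons_of_neg (p := fun c => is_.any fun i => PySem.Str.isIn i c)
          (show ¬(is_.any fun i => PySem.Str.isIn i c) = true by rw [h]; exact Bool.false_ne_true)]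
      exact ih

-- 'any' is invariant under sorting the interventions
theorem any_sorted_eq (is_ : List String) (f : String → Bool) :
    (PySem.List.sorted is_ (fun x => x) false).any f = is_.any f := by
  have hp := PySem.List.sorted_perm is_ (fun x => x) false
  apply Bool.eq_iff_iff.mpr
  rw [List.any_eq_true, List.any_eq_true]
  constructor <;> rintro ⟨x, hx, hfx⟩
  · exact ⟨x, hp.mem_iff.mp hx, hfx⟩
  · exact ⟨x, hp.mem_iff.mpr hx, hfx⟩

-- find? as head-of-filter (first satisfying element)
theorem find?_eq_head?_filter' {α : Type} (p : α → Bool) (l : List α) :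
    l.find? p = (l.filter p).head? := by
  induction l with
  | nil => rfl
  | cons a t ih =>
    cases h : p a with
    | true => rw [List.find?_cons_of_pos h, List.filter_cons_of_pos h]; rfl
    | false => rw [List.find?_cons_of_neg (by simp [h]), List.filter_cons_of_neg (by simp [h]), ih]

-- first element of the sorted candidates satisfying p = minimum of the matching candidates
theorem find?_sorted_eq_min? (cs : List String) (p : String → Bool) :
    (PySem.List.sorted cs (fun x => x) false).find? p = PySem.List.min? (cs.filter p) (fun x => x) := by
  have hperm : ((PySem.List.sorted cs (fun x => x) false).filter p).Perm (cs.filter p) :=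
    (PySem.List.sorted_perm cs (fun x => x) false).filter p
  have hpw : ((PySem.List.sorted cs (fun x => x) false).filter p).Pairwise (fun a b => a ≤ b) :=
    List.Pairwise.filter p (PySem.List.sorted_pairwise cs (fun x => x))
  cases hG : cs.filter p with
  | nil =>
    have hF : (PySem.List.sorted cs (fun x => x) false).filter p = [] := by
      rw [hG] at hperm; exact hperm.eq_nil
    rw [find?_eq_head?_filter', hF]
    exact ((PySem.List.min?_eq_none_iff _ _).mpr rfl).symm
  | cons g t' =>
    have hFne : (PySem.List.sorted cs (fun x => x) false).filter p ≠ [] := by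
      intro hnil; rw [hnil, hG] at hperm; exact absurd hperm.nil_eq (by simp)
    obtain ⟨h, t, hF⟩ := List.exists_cons_of_ne_nil hFne
    cases hm : PySem.List.min? (cs.filter p) (fun x => x) with
    | none =>
      rw [PySem.List.min?_eq_none_iff] at hm
      rw [hm] at hG; exact absurd hG (by simp)
    | some m =>
      have hmemF : m ∈ (PySem.List.sorted cs (fun x => x) false).filter p :=
        hperm.mem_iff.mpr (PySem.List.min?_mem hm)
      have hmemG : h ∈ cs.filter p := hperm.mem_iff.mp (hF ▸ List.mem_cons_self)
      have h1 : h ≤ m := by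
        rw [hF] at hmemF
        rcases List.mem_cons.mp hmemF with hEq | hMem
        · exact le_of_eq hEq.symm
        · exact (List.rel_of_pairwise_cons (hF ▸ hpw) hMem)
      have h2 : m ≤ h := PySem.List.min?_isMin hm h hmemG
      calc (PySem.List.sorted cs (fun x => x) false).find? p
          = ((PySem.List.sorted cs (fun x => x) false).filter p).head? :=
            find?_eq_head?_filter' p _
        _ = some h := by rw [hF]; rfl
        _ = some m := by rw [le_antisymm h1 h2]
        _ = PySem.List.min? (g :: t') (fun x => x) := by rw [← hG]; exact hm.symm

theorem find_partial_match_spec : Claim_equal_find_partial_match := by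
  intro cs is_ _
  unfold Spec_find_partial_match find_partial_match find_partial_match_alt
  rw [fpmOuter_eq]
  have hany : (fun c => (PySem.List.sorted is_ (fun x => x) false).any (fun i => PySem.Str.isIn i c))
      = (fun c => is_.any (fun i => PySem.Str.isIn i c)) := by
    funext c; exact any_sorted_eq is_ (fun i => PySem.Str.isIn i c)
  rw [hany, find?_sorted_eq_min?]
  by_cases hE : (cs.filter (fun c => is_.any (fun i => PySem.Str.isIn i c))).isEmpty
  · rw [if_pos hE]
    exact (PySem.List.min?_eq_none_iff _ _).mpr (List.isEmpty_iff.mp hE)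
  · rw [if_neg hE]
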